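-- pv_equiv track=rewrite | github.com/rickyurvinauc/IIC1103_2025_I | clases/Clase16_listas/solucion_i1/p7.py | agregar_puntos
-- ===== SOURCE A (Python) =====
-- def agregar_puntos(texto):
--     frase = ""
--     indice = 0
--     indice_anterior = 0
--     for letra in texto:
--         if letra.isupper() and indice > 0:
--             frase_cortada = texto[indice_anterior:indice-1]+". "
--             frase += frase_cortada
--             indice_anterior = indice
--         indice += 1
--         if indice == len(texto):
--             frase_cortada = texto[indice_anterior:]+"."
--             frase+= frase_cortada
--     return frase
-- ===== SOURCE B (Python) =====
-- def agregar_puntos(texto):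
--     if not texto:
--         return ""
--     n = len(texto)
--     out = []
--     for j in range(n):
--         if j + 1 < n and texto[j + 1].isupper():
--             out.append(". ")
--         else:
--             out.append(texto[j])
--     out.append(".")
--     return "".join(out)
-- ===== Notes on version B (the rewrite author's own statement) =====
-- stated objective: alternative
-- what changed: B replaces A's stateful split-at-uppercase scan (accumulating slices between remembered trigger indices and a last-iteration tail branch) by a stateless pointwise character substitution: each character is emitted unchanged unless its successor is uppercase, in which case '. ' is emitted in its place, plus one final period.
import Mathlib
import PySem

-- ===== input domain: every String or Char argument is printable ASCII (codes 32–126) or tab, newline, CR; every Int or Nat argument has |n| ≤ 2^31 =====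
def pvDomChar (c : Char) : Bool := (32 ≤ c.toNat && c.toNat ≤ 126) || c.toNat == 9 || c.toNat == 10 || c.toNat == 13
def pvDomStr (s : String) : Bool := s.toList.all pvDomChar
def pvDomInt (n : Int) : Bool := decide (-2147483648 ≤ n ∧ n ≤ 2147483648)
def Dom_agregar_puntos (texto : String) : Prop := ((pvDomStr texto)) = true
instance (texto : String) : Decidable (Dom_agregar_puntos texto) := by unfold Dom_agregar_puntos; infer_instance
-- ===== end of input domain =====

-- B replaces A's stateful split-at-uppercase scan (slices between remembered trigger indices,
-- in-loop tail branch) by a stateless pointwise substitution: each char is kept unless its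
-- successor is uppercase, in which case ". " replaces it; one final period (alternative).

-- ===== PORT A =====
-- A's loop body: state = (frase, indice, indice_anterior); faithful to the two in-loop branches.
def agregarPuntosBodyA (cs : List Char) (st : List Char × Int × Int) (letra : Char) : List Char × Int × Int :=
  let frase := st.1
  let indice := st.2.1
  let indice_anterior := st.2.2
  let (frase, indice_anterior) :=
    if PySem.Chars.isupper letra && decide (indice > 0) then
      (frase ++ (PySem.List.slice cs (some indice_anterior) (some (indice - 1)) ++ (". ".toList)), indice)
    else (frase, indice_anterior)
  let indice := indice + 1
  let frase :=
    if indice = (cs.length : Int) then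
      frase ++ (PySem.List.slice cs (some indice_anterior) none ++ (".".toList))
    else frase
  (frase, indice, indice_anterior)

def agregar_puntos (texto : String) : String :=
  let cs := texto.toList
  String.ofList (cs.foldl (agregarPuntosBodyA cs) ([], 0, 0)).1

-- ===== PORT B =====
-- B's per-index piece: ". " if the next character exists and is uppercase, else the character
-- itself (indices are in range, so plain in-range access texto[j] is ported as getD — exact here).
def agregarPuntosPieceB (cs : List Char) (j : Nat) : List Char :=
  if j + 1 < cs.length ∧ PySem.Chars.isupper (cs.getD (j + 1) ' ') = true then ". ".toList
  else [cs.getD j ' ']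

def agregar_puntos_alt (texto : String) : String :=
  let cs := texto.toList
  if cs.isEmpty then "" else
  String.ofList (((List.range cs.length).map (agregarPuntosPieceB cs)).flatten ++ (".".toList))

-- ===== PRECONDITION & SPEC =====
def Spec_agregar_puntos (texto : String) (out : String) : Prop := out = agregar_puntos_alt texto
instance (texto : String) (out : String) : Decidable (Spec_agregar_puntos texto out) := by unfold Spec_agregar_puntos; infer_instance

-- ===== CLAIM (what is proved, stated in full; the proofs are below) =====
def Claim_equal_agregar_puntos : Prop := ∀ (texto : String), Dom_agregar_puntos texto → Spec_agregar_puntos texto (agregar_puntos texto)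

-- ===== LEMMAS AND PROOFS =====

-- Where every piece is the single original character, the flattened pieces are just the slice.
lemma flatten_pieces_singles (cs : List Char) :
    ∀ (k a : Nat), a + k ≤ cs.length →
      (∀ j, a ≤ j → j < a + k → agregarPuntosPieceB cs j = [cs.getD j ' ']) →
      ((List.range' a k).map (agregarPuntosPieceB cs)).flatten = (cs.drop a).take k := by
  intro k
  induction k with
  | zero => intro a _ _; simp
  | succ k ih =>
      intro a hle hsing
      have ha : a < cs.length := by omega
      rw [List.range'_succ]
      simp only [List.map_cons, List.flatten_cons]
      rw [hsing a le_rfl (by omega), ih (a + 1) (by omega)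
        (fun j h1 h2 => hsing j (by omega) (by omega))]
      rw [List.drop_eq_getElem_cons ha, List.take_succ_cons]
      simp [List.getD_eq_getElem?_getD, List.getElem?_eq_getElem ha]

-- range' split into three regions [a, b) ++ [b] ++ [b+1, n).
lemma range'_three (a b n : Nat) (h1 : a ≤ b) (h2 : b < n) :
    List.range' a (n - a) = List.range' a (b - a) ++ [b] ++ List.range' (b + 1) (n - (b + 1)) := by
  have e1 : List.range' a (b - a) ++ List.range' (a + 1 * (b - a)) ((n - a) - (b - a))
      = List.range' a ((b - a) + ((n - a) - (b - a))) := List.range'_append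
  rw [one_mul] at e1
  have e2 : List.range' b ((n - a) - (b - a)) = b :: List.range' (b + 1) (n - (b + 1)) := by
    have : (n - a) - (b - a) = (n - (b + 1)) + 1 := by omega
    rw [this, List.range'_succ]
  have hab : a + (b - a) = b := by omega
  rw [show (n - a) = (b - a) + ((n - a) - (b - a)) by omega, ← e1, hab, e2]
  simp

-- Main loop correspondence: A's fold from position i (last trigger at prev) appends exactly
-- the pointwise pieces for indices ≥ prev plus the final period.
lemma loopA (cs : List Char) :
    ∀ (l : List Char) (i prev : Nat) (frase : List Char),
      l = cs.drop i → i < cs.length → prev ≤ i → (0 < i → prev < i) →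
      (∀ k, prev < k → k < i → ¬ (PySem.Chars.isupper (cs.getD k ' ') = true)) →
      (l.foldl (agregarPuntosBodyA cs) (frase, (i : Int), (prev : Int))).1
        = frase ++ ((List.range' prev (cs.length - prev)).map (agregarPuntosPieceB cs)).flatten
            ++ (".".toList) := by
  intro l
  induction l with
  | nil =>
      intro i prev frase hdrop hlt _ _ _
      exfalso
      have := congrArg List.length hdrop
      simp [List.length_drop] at this
      omega
  | cons c rest ih =>
      intro i prev frase hdrop hlt hple hplt hinv
      have hrest : rest = cs.drop (i + 1) := by
        have h := congrArg List.tail hdrop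
        simpa [List.tail_drop] using h
      have hc : cs.getD i ' ' = c := by
        have h0 : (cs.drop i)[0]? = some c := by rw [← hdrop]; rfl
        rw [List.getElem?_drop] at h0
        simp only [Nat.add_zero] at h0
        simp [List.getD_eq_getElem?_getD, h0]
      simp only [List.foldl_cons]
      by_cases htr : (PySem.Chars.isupper c && decide ((i : Int) > 0)) = true
      · -- trigger: i > 0 and cs[i] uppercase
        have hipos : 0 < i := by
          rcases Bool.and_eq_true_iff.mp htr with ⟨_, h2⟩
          have := of_decide_eq_true h2
          exact_mod_cast this
        have hup : PySem.Chars.isupper (cs.getD i ' ') = true := by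
          rw [hc]; exact (Bool.and_eq_true_iff.mp htr).1
        have hpi : prev < i := hplt hipos
        have hcast : (i : Int) - 1 = ((i - 1 : Nat) : Int) := by omega
        have hslice : PySem.List.slice cs (some (prev : Int)) (some ((i : Int) - 1))
            = (cs.drop prev).take ((i - 1) - prev) := by
          rw [hcast, PySem.List.slice_natCast]
        -- region [prev, i-1) is all singleton pieces; piece (i-1) is ". "
        have hreg : ((List.range' prev ((i - 1) - prev)).map (agregarPuntosPieceB cs)).flatten
            = (cs.drop prev).take ((i - 1) - prev) := by
          apply flatten_pieces_singles cs ((i - 1) - prev) prev (by omega)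
          intro j h1 h2
          unfold agregarPuntosPieceB
          rw [if_neg]
          rintro ⟨_, hu⟩
          exact hinv (j + 1) (by omega) (by omega) hu
        have hpiece : agregarPuntosPieceB cs (i - 1) = ". ".toList := by
          unfold agregarPuntosPieceB
          rw [if_pos]
          constructor
          · omega
          · have : i - 1 + 1 = i := by omega
            rw [this]; exact hup
        have hsplit : ((List.range' prev (cs.length - prev)).map (agregarPuntosPieceB cs)).flatten
            = (cs.drop prev).take ((i - 1) - prev) ++ ". ".toList
              ++ ((List.range' i (cs.length - i)).map (agregarPuntosPieceB cs)).flatten := by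
          rw [range'_three prev (i - 1) cs.length (by omega) (by omega)]
          have : i - 1 + 1 = i := by omega
          simp only [List.map_append, List.flatten_append, List.map_cons, List.map_nil,
            List.flatten_cons, List.flatten_nil, hreg, hpiece, this]
          simp [List.append_assoc]
        by_cases hend : (i : Int) + 1 = (cs.length : Int)
        · -- this was the last character
          have hiN : i + 1 = cs.length := by exact_mod_cast hend
          have hrnil : rest = [] := by rw [hrest, hiN]; simp
          subst hrnil
          simp only [agregarPuntosBodyA, htr, if_pos, List.foldl_nil, if_pos hend]
          have htail : PySem.List.slice cs (some (i : Int)) none = cs.drop i :=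
            PySem.List.slice_from_natCast cs i
          have hlast : ((List.range' i (cs.length - i)).map (agregarPuntosPieceB cs)).flatten
              = cs.drop i := by
            have : ((List.range' i (cs.length - i)).map (agregarPuntosPieceB cs)).flatten
                = (cs.drop i).take (cs.length - i) := by
              apply flatten_pieces_singles cs (cs.length - i) i (by omega)
              intro j h1 h2
              unfold agregarPuntosPieceB
              rw [if_neg]
              rintro ⟨hj, _⟩
              omega
            rw [this, List.take_of_length_le (by simp [List.length_drop])]
          rw [hsplit, hslice, htail, hlast]
          simp [List.append_assoc]
        · have hlt' : i + 1 < cs.length := by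
            have h1 : i + 1 ≤ cs.length := hlt
            rcases lt_or_eq_of_le h1 with h | h
            · exact h
            · exact absurd (by exact_mod_cast h) hend
          simp only [agregarPuntosBodyA, htr, if_pos, if_neg hend]
          have := ih (i + 1) i
            (frase ++ (PySem.List.slice cs (some (prev : Int)) (some ((i : Int) - 1)) ++ ". ".toList))
            hrest hlt' (by omega) (fun _ => by omega)
            (fun k h1 h2 => by omega)
          rw [show (((i + 1 : Nat)) : Int) = ((i : Int) + 1) by push_cast; ring] at this
          rw [this, hslice, hsplit]
          simp [List.append_assoc]
      · -- no trigger
        have hnotr : ∀ k, prev < k → k < i + 1 → ¬ (PySem.Chars.isupper (cs.getD k ' ') = true) := by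
          intro k h1 h2
          by_cases hk : k = i
          · subst hk
            intro hu
            have hipos : 0 < k := by omega
            apply htr
            rw [hc] at hu
            simp [hu]
            exact_mod_cast hipos
          · exact hinv k h1 (by omega)
        by_cases hend : (i : Int) + 1 = (cs.length : Int)
        · have hiN : i + 1 = cs.length := by exact_mod_cast hend
          have hrnil : rest = [] := by rw [hrest, hiN]; simp
          subst hrnil
          simp only [agregarPuntosBodyA, htr, Bool.false_eq_true, if_false, List.foldl_nil,
            if_pos hend]
          have htail : PySem.List.slice cs (some (prev : Int)) none = cs.drop prev :=
            PySem.List.slice_from_natCast cs prev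
          have hall : ((List.range' prev (cs.length - prev)).map (agregarPuntosPieceB cs)).flatten
              = cs.drop prev := by
            have : ((List.range' prev (cs.length - prev)).map (agregarPuntosPieceB cs)).flatten
                = (cs.drop prev).take (cs.length - prev) := by
              apply flatten_pieces_singles cs (cs.length - prev) prev (by omega)
              intro j h1 h2
              unfold agregarPuntosPieceB
              rw [if_neg]
              rintro ⟨hj, hu⟩
              exact hnotr (j + 1) (by omega) (by omega) hu
            rw [this, List.take_of_length_le (by simp [List.length_drop])]
          rw [htail, hall]
          simp [List.append_assoc]
        · have hlt' : i + 1 < cs.length := by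
            have h1 : i + 1 ≤ cs.length := hlt
            rcases lt_or_eq_of_le h1 with h | h
            · exact h
            · exact absurd (by exact_mod_cast h) hend
          simp only [agregarPuntosBodyA, htr, Bool.false_eq_true, if_false, if_neg hend]
          have := ih (i + 1) prev frase hrest hlt' (by omega) (fun _ => by omega) hnotr
          rw [show (((i + 1 : Nat)) : Int) = ((i : Int) + 1) by push_cast; ring] at this
          exact this

-- ===== VERDICT (by name: the statement is the Claim_ definition above) =====
theorem agregar_puntos_spec : Claim_equal_agregar_puntos := by
  intro texto _
  unfold Spec_agregar_puntos agregar_puntos agregar_puntos_alt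
  by_cases hE : texto.toList.isEmpty = true
  · have h0 : texto.toList = [] := List.isEmpty_iff.mp hE
    simp [h0]
  · have h0 : texto.toList ≠ [] := fun h => hE (by simp [h])
    have hlt : 0 < texto.toList.length := List.length_pos_of_ne_nil h0
    have key := loopA texto.toList texto.toList 0 0 [] rfl hlt le_rfl (by omega)
      (fun k h1 h2 => by omega)
    rw [if_neg hE]
    have key' : (texto.toList.foldl (agregarPuntosBodyA texto.toList) ([], 0, 0)).1
        = ((List.range texto.toList.length).map (agregarPuntosPieceB texto.toList)).flatten
          ++ (".".toList) := by
      rw [List.range_eq_range']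
      simpa using key
    exact congrArg String.ofList key'
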